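-- pv_equiv track=rewrite | github.com/AdrianVvd/respondo | src/jsonparse/__init__.py | _json_segments
-- ===== SOURCE A (Python) =====
-- from typing import Any, List
--
-- def _json_segments(text: str) -> List[tuple[int, int]]:
--     """Find JSON object/array boundaries in text."""
--     segments: List[tuple[int, int]] = []
--     stack: List[str] = []
--     start = -1
--     in_string = False
--     escaped = False
--
--     for idx, ch in enumerate(text):
--         if in_string:
--             if escaped:
--                 escaped = False
--                 continue
--             if ch == "\\":
--                 escaped = True
--                 continue
--             if ch == '"':
--                 in_string = False
--             continue
--
--         if ch == '"':
--             in_string = True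
--             continue
--         if ch in "{[":
--             if not stack:
--                 start = idx
--             stack.append(ch)
--         elif ch in "}]":
--             if not stack:
--                 continue
--             open_ch = stack.pop()
--             if (open_ch == "{" and ch == "}") or (open_ch == "[" and ch == "]"):
--                 if not stack and start >= 0:
--                     segments.append((start, idx + 1))
--                     start = -1
--             else:
--                 start = -1
--                 stack.clear()
--     return segments
-- ===== SOURCE B (Python) =====
-- from typing import List
--
-- def _json_segments(text: str) -> List[tuple[int, int]]:
--     """Find JSON object/array boundaries: tokenize brackets first, then recursive descent."""
--     # Pass 1: collect bracket tokens outside string literals.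
--     toks: List[tuple[int, str]] = []
--     i, n = 0, len(text)
--     while i < n:
--         ch = text[i]
--         if ch == '"':
--             i += 1
--             while i < n and text[i] != '"':
--                 i += 2 if text[i] == "\\" else 1
--         elif ch in "{[}]":
--             toks.append((i, ch))
--         i += 1
--
--     # Pass 2: recursive-descent matching over the token list (no explicit stack).
--     def match(k: int) -> tuple[bool, int]:
--         # toks[k] is an opener; returns (matched, resume index just past consumption)
--         close = "}" if toks[k][1] == "{" else "]"
--         k += 1
--         while k < len(toks):
--             c = toks[k][1]
--             if c == "{" or c == "[":
--                 ok, k = match(k)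
--                 if not ok:
--                     return False, k
--             elif c == close:
--                 return True, k + 1
--             else:
--                 return False, k + 1
--         return False, k
--
--     segments: List[tuple[int, int]] = []
--     k = 0
--     while k < len(toks):
--         pos, ch = toks[k]
--         if ch == "{" or ch == "[":
--             ok, k2 = match(k)
--             if ok:
--                 segments.append((pos, toks[k2 - 1][0] + 1))
--             k = k2
--         else:
--             k += 1
--     return segments
-- ===== Notes on version B (the rewrite author's own statement) =====
-- stated objective: alternative
-- what changed: Replaces A's single-pass flag-threaded state machine (in_string/escaped flags, explicit opener stack with start/-1 bookkeeping) by two staged passes: a tokenizer that first extracts bracket tokens outside string literals, then a recursive-descent matcher over the token list whose nesting is recursion depth instead of an explicit stack.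
import Mathlib
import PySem

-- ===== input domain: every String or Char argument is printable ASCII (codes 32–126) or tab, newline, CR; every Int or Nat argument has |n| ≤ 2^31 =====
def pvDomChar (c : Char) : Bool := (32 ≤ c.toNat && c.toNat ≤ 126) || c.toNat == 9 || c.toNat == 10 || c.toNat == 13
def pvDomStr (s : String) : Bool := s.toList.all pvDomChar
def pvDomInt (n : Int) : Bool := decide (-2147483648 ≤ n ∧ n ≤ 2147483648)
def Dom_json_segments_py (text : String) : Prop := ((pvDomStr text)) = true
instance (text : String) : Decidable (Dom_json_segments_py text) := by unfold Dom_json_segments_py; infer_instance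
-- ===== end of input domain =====

-- B replaces A's flag-threaded single-pass scan by two staged passes (bracket tokenizer,
-- then a recursive-descent matcher over the tokens); objective: alternative decomposition.

-- ===== PORT A =====
-- state = (segments, stack (head = top), start, in_string, escaped)
def jsA_step (st : List (Int × Int) × List Char × Int × Bool × Bool) (p : Int × Char) :
    List (Int × Int) × List Char × Int × Bool × Bool :=
  match st, p with
  | (segments, stack, start, in_string, escaped), (idx, ch) =>
    if in_string then
      if escaped then (segments, stack, start, in_string, false)
      else if ch = '\\' then (segments, stack, start, in_string, true)
      else if ch = '"' then (segments, stack, start, false, escaped)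
      else (segments, stack, start, in_string, escaped)
    else if ch = '"' then (segments, stack, start, true, escaped)
    else if ch = '{' ∨ ch = '[' then
      (segments, ch :: stack, (if stack = [] then idx else start), in_string, escaped)
    else if ch = '}' ∨ ch = ']' then
      match stack with
      | [] => (segments, stack, start, in_string, escaped)
      | open_ch :: rest =>
        if (open_ch = '{' ∧ ch = '}') ∨ (open_ch = '[' ∧ ch = ']') then
          if rest = [] ∧ 0 ≤ start then
            (segments ++ [(start, idx + 1)], rest, -1, in_string, escaped)
          else (segments, rest, start, in_string, escaped)
        else (segments, [], -1, in_string, escaped)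
    else (segments, stack, start, in_string, escaped)

def json_segments_py (text : String) : List (Int × Int) :=
  ((PySem.List.enumerate text.toList 0).foldl jsA_step ([], [], -1, false, false)).1

-- ===== PORT B =====
-- inner while loop of pass 1: advance through the string body (i tracks the Python index)
def jsSkip : List Char → Nat → List Char × Nat
  | [], i => ([], i)
  | c :: rest, i =>
    if c = '"' then (c :: rest, i)
    else if c = '\\' then
      match rest with
      | [] => ([], i + 2)
      | _ :: rest2 => jsSkip rest2 (i + 2)
    else jsSkip rest (i + 1)

theorem jsSkip_len_le : ∀ (cs : List Char) (i : Nat), (jsSkip cs i).1.length ≤ cs.length := by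
  intro cs i
  induction cs, i using jsSkip.induct with
  | case1 i => simp [jsSkip]
  | case2 rest i => rw [jsSkip.eq_def]; simp
  | case3 i h => rw [jsSkip.eq_def]; simp
  | case4 i d rest2 h ih => rw [jsSkip.eq_def]; simp only [if_neg h]; simp; omega
  | case5 c rest i h1 h2 ih => rw [jsSkip.eq_def]; simp only [if_neg h1, if_neg h2]; simp; omega

-- pass 1: bracket tokens outside string literals
def jsToks : List Char → Nat → List (Nat × Char)
  | [], _ => []
  | c :: rest, i =>
    if c = '"' then
      match h : jsSkip rest (i + 1) with
      | ([], _) => []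
      | (_ :: tail, j) => jsToks tail (j + 1)
    else if c = '{' ∨ c = '[' ∨ c = '}' ∨ c = ']' then
      (i, c) :: jsToks rest (i + 1)
    else jsToks rest (i + 1)
termination_by cs _ => cs.length
decreasing_by
  · have t := jsSkip_len_le rest (i + 1)
    rw [h] at t
    exact Nat.lt_succ_of_le (Nat.le_of_succ_le t)
  · exact Nat.lt_succ_self _
  · exact Nat.lt_succ_self _

def jsCloseOf (c : Char) : Char := if c = '{' then '}' else ']'

-- pass 2: recursive-descent matcher; the subtype carries the suffix bound used for termination
def jsMatchS : Char → (l : List (Nat × Char)) →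
    {r : Option Nat × List (Nat × Char) // r.2.length ≤ l.length}
  | _, [] => ⟨(none, []), Nat.le_refl _⟩
  | close, (p, c) :: rest =>
    if c = '{' ∨ c = '[' then
      let inner := jsMatchS (jsCloseOf c) rest
      match h : inner.val with
      | (none, rest') => ⟨(none, rest'), Nat.le_succ_of_le (congrArg (fun r => r.2.length) h ▸ inner.property)⟩
      | (some _, rest') =>
        let outer := jsMatchS close rest'
        ⟨outer.val, Nat.le_succ_of_le (Nat.le_trans outer.property (congrArg (fun r => r.2.length) h ▸ inner.property))⟩
    else if c = close then ⟨(some p, rest), Nat.le_succ_of_le (Nat.le_refl _)⟩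
    else ⟨(none, rest), Nat.le_succ_of_le (Nat.le_refl _)⟩
termination_by _ l => l.length
decreasing_by
  · exact Nat.lt_succ_self _
  · exact Nat.lt_succ_of_le (congrArg (fun r => r.2.length) h ▸ inner.property)

def jsMatch (close : Char) (l : List (Nat × Char)) : Option Nat × List (Nat × Char) :=
  (jsMatchS close l).val

theorem jsMatch_len_le (close : Char) (l : List (Nat × Char)) :
    (jsMatch close l).2.length ≤ l.length := (jsMatchS close l).property

-- top-level while loop of pass 2
def jsTop : List (Nat × Char) → List (Int × Int) → List (Int × Int)
  | [], segs => segs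
  | (p, c) :: rest, segs =>
    if c = '{' ∨ c = '[' then
      match h : jsMatch (jsCloseOf c) rest with
      | (some q, rest') => jsTop rest' (segs ++ [((p : Int), (q : Int) + 1)])
      | (none, rest') => jsTop rest' segs
    else jsTop rest segs
termination_by l _ => l.length
decreasing_by
  · exact Nat.lt_succ_of_le (congrArg (fun r => r.2.length) h ▸ jsMatch_len_le (jsCloseOf c) rest)
  · exact Nat.lt_succ_of_le (congrArg (fun r => r.2.length) h ▸ jsMatch_len_le (jsCloseOf c) rest)
  · exact Nat.lt_succ_self _

def json_segments_py_alt (text : String) : List (Int × Int) :=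
  jsTop (jsToks text.toList 0) []

-- ===== PRECONDITION & SPEC =====
def Spec_json_segments_py (text : String) (out : List (Int × Int)) : Prop := out = json_segments_py_alt text
instance (text : String) (out : List (Int × Int)) : Decidable (Spec_json_segments_py text out) := by unfold Spec_json_segments_py; infer_instance

-- ===== CLAIM =====
def Claim_equal_json_segments_py : Prop := ∀ (text : String), Dom_json_segments_py text → Spec_json_segments_py text (json_segments_py text)

-- ===== LEMMAS AND PROOFS =====

-- intermediate machine: A's non-string bracket logic run over the token list
def jsM : List (Nat × Char) → List Char → Int → List (Int × Int) → List (Int × Int)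
  | [], _, _, segs => segs
  | (i, c) :: rest, stack, start, segs =>
    if c = '{' ∨ c = '[' then
      jsM rest (c :: stack) (if stack = [] then (i : Int) else start) segs
    else if c = '}' ∨ c = ']' then
      match stack with
      | [] => jsM rest [] start segs
      | o :: s' =>
        if (o = '{' ∧ c = '}') ∨ (o = '[' ∧ c = ']') then
          if s' = [] ∧ 0 ≤ start then jsM rest s' (-1) (segs ++ [(start, (i : Int) + 1)])
          else jsM rest s' start segs
        else jsM rest [] (-1) segs
    else jsM rest stack start segs

-- A's in-string phase agrees with the tokenizer's inner skip loop
theorem jsA_skip_eq : ∀ (cs : List Char) (i : Nat)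
    (segs : List (Int × Int)) (stack : List Char) (start : Int),
    (match jsSkip cs i with
     | ([], _) => ∃ e, (PySem.List.enumerate cs (i : Int)).foldl jsA_step (segs, stack, start, true, false)
          = (segs, stack, start, true, e)
     | (_ :: tail, j) => (PySem.List.enumerate cs (i : Int)).foldl jsA_step (segs, stack, start, true, false)
          = (PySem.List.enumerate tail ((j : Int) + 1)).foldl jsA_step (segs, stack, start, false, false)) := by
  intro cs i segs stack start
  induction cs, i using jsSkip.induct generalizing segs stack start with
  | case1 i => exact ⟨false, by simp [PySem.List.enumerate_nil]⟩
  | case2 rest i =>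
      rw [jsSkip.eq_def]
      simp [PySem.List.enumerate_cons, jsA_step]
  | case3 i h =>
      rw [jsSkip.eq_def]
      exact ⟨true, by simp [PySem.List.enumerate_cons, PySem.List.enumerate_nil, jsA_step]⟩
  | case4 i d rest2 h ih =>
      rw [jsSkip.eq_def]
      simp only [if_neg h, reduceIte, PySem.List.enumerate_cons, List.foldl_cons]
      have hstep : jsA_step (segs, stack, start, true, false) ((i : Int), '\\') = (segs, stack, start, true, true) := by
        simp [jsA_step]
      have hstep2 : jsA_step (segs, stack, start, true, true) ((i : Int) + 1, d) = (segs, stack, start, true, false) := by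
        simp [jsA_step]
      rw [hstep, hstep2]
      have hcast : ((i : Int) + 1 + 1) = (((i + 2 : Nat)) : Int) := by push_cast; ring
      rw [hcast]
      exact ih segs stack start
  | case5 c rest i h1 h2 ih =>
      rw [jsSkip.eq_def]
      simp only [if_neg h1, if_neg h2, PySem.List.enumerate_cons, List.foldl_cons]
      have hstep : jsA_step (segs, stack, start, true, false) ((i : Int), c) = (segs, stack, start, true, false) := by
        simp [jsA_step, h1, h2]
      rw [hstep]
      have hcast : ((i : Int) + 1) = (((i + 1 : Nat)) : Int) := by push_cast; ring
      rw [hcast]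
      exact ih segs stack start

-- A's full scan equals jsM over the token list
theorem jsA_eq_M : ∀ (cs : List Char) (i : Nat) (stack : List Char) (start : Int)
    (segs : List (Int × Int)),
    ((PySem.List.enumerate cs (i : Int)).foldl jsA_step (segs, stack, start, false, false)).1
      = jsM (jsToks cs i) stack start segs := by
  intro cs i
  induction cs, i using jsToks.induct with
  | case1 i => intro stack start segs; simp [jsToks, jsM, PySem.List.enumerate_nil]
  | case2 rest i snd hsk =>
      intro stack start segs
      rw [jsToks.eq_def]
      simp only [reduceIte, PySem.List.enumerate_cons, List.foldl_cons]
      have hstep : jsA_step (segs, stack, start, false, false) ((i : Int), '"') = (segs, stack, start, true, false) := by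
        simp [jsA_step]
      rw [hstep]
      have h := jsA_skip_eq rest (i + 1) segs stack start
      rw [hsk] at h
      obtain ⟨e, he⟩ := h
      have hcast : ((i : Int) + 1) = (((i + 1 : Nat)) : Int) := by push_cast; ring
      rw [hcast, he]
      split
      · simp [jsM]
      · next heq => rw [hsk] at heq; simp at heq
  | case3 rest i head tail j hsk ih =>
      intro stack start segs
      rw [jsToks.eq_def]
      simp only [reduceIte, PySem.List.enumerate_cons, List.foldl_cons]
      have hstep : jsA_step (segs, stack, start, false, false) ((i : Int), '"') = (segs, stack, start, true, false) := by
        simp [jsA_step]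
      rw [hstep]
      have h := jsA_skip_eq rest (i + 1) segs stack start
      rw [hsk] at h
      have hcast : ((i : Int) + 1) = (((i + 1 : Nat)) : Int) := by push_cast; ring
      rw [hcast, h]
      have hcast2 : ((j : Int) + 1) = (((j + 1 : Nat)) : Int) := by push_cast; ring
      rw [hcast2]
      split
      · next heq => rw [hsk] at heq; simp at heq
      · next heq =>
          rw [hsk] at heq
          simp only [Prod.mk.injEq, List.cons.injEq] at heq
          obtain ⟨⟨rfl, rfl⟩, rfl⟩ := heq
          exact ih stack start segs
  | case4 c rest i h1 h2 ih =>
      intro stack start segs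
      rw [jsToks.eq_def]
      simp only [if_neg h1, if_pos h2, PySem.List.enumerate_cons, List.foldl_cons]
      have hcast : ((i : Int) + 1) = (((i + 1 : Nat)) : Int) := by push_cast; ring
      rcases h2 with h2 | h2 | h2 | h2 <;> subst h2
      · have hstep : jsA_step (segs, stack, start, false, false) ((i : Int), '{')
            = (segs, '{' :: stack, (if stack = [] then (i : Int) else start), false, false) := by
          simp [jsA_step]
        rw [hstep, hcast, ih]
        simp [jsM]
      · have hstep : jsA_step (segs, stack, start, false, false) ((i : Int), '[')
            = (segs, '[' :: stack, (if stack = [] then (i : Int) else start), false, false) := by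
          simp [jsA_step]
        rw [hstep, hcast, ih]
        simp [jsM]
      · match stack with
        | [] =>
            have hstep : jsA_step (segs, [], start, false, false) ((i : Int), '}') = (segs, [], start, false, false) := by
              simp [jsA_step]
            rw [hstep, hcast, ih]
            simp [jsM]
        | o :: s' =>
            by_cases ho : o = '{'
            · subst ho
              by_cases he : s' = [] ∧ 0 ≤ start
              · have hstep : jsA_step (segs, '{' :: s', start, false, false) ((i : Int), '}')
                    = (segs ++ [(start, (i : Int) + 1)], s', -1, false, false) := by
                  simp [jsA_step, he]
                rw [hstep, hcast, ih]
                simp [jsM, he]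
              · have hstep : jsA_step (segs, '{' :: s', start, false, false) ((i : Int), '}')
                    = (segs, s', start, false, false) := by
                  simp [jsA_step, he]
                rw [hstep, hcast, ih]
                simp [jsM, he]
            · have hstep : jsA_step (segs, o :: s', start, false, false) ((i : Int), '}')
                  = (segs, [], -1, false, false) := by
                simp [jsA_step, ho]
              rw [hstep, hcast, ih]
              simp [jsM, ho]
      · match stack with
        | [] =>
            have hstep : jsA_step (segs, [], start, false, false) ((i : Int), ']') = (segs, [], start, false, false) := by
              simp [jsA_step]
            rw [hstep, hcast, ih]
            simp [jsM]
        | o :: s' =>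
            by_cases ho : o = '['
            · subst ho
              by_cases he : s' = [] ∧ 0 ≤ start
              · have hstep : jsA_step (segs, '[' :: s', start, false, false) ((i : Int), ']')
                    = (segs ++ [(start, (i : Int) + 1)], s', -1, false, false) := by
                  simp [jsA_step, he]
                rw [hstep, hcast, ih]
                simp [jsM, he]
              · have hstep : jsA_step (segs, '[' :: s', start, false, false) ((i : Int), ']')
                    = (segs, s', start, false, false) := by
                  simp [jsA_step, he]
                rw [hstep, hcast, ih]
                simp [jsM, he]
            · have hstep : jsA_step (segs, o :: s', start, false, false) ((i : Int), ']')
                  = (segs, [], -1, false, false) := by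
                simp [jsA_step, ho]
              rw [hstep, hcast, ih]
              simp [jsM, ho]
  | case5 c rest i h1 h2 ih =>
      intro stack start segs
      rw [jsToks.eq_def]
      simp only [if_neg h1, if_neg h2, PySem.List.enumerate_cons, List.foldl_cons]
      have hc : ¬(c = '{' ∨ c = '[') ∧ ¬(c = '}' ∨ c = ']') := by
        constructor <;> rintro (rfl | rfl) <;> simp at h2
      have hstep : jsA_step (segs, stack, start, false, false) ((i : Int), c) = (segs, stack, start, false, false) := by
        simp only [jsA_step]
        simp [h1, hc.1, hc.2]
      rw [hstep]
      have hcast : ((i : Int) + 1) = (((i + 1 : Nat)) : Int) := by push_cast; ring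
      rw [hcast]
      exact ih stack start segs

def jsBr (c : Char) : Prop := c = '{' ∨ c = '[' ∨ c = '}' ∨ c = ']'

theorem jsToks_brackets : ∀ (cs : List Char) (i : Nat) (p : Nat × Char),
    p ∈ jsToks cs i → jsBr p.2 := by
  intro cs i
  induction cs, i using jsToks.induct with
  | case1 i => intro p hp; simp [jsToks] at hp
  | case2 rest i snd hsk =>
      intro p hp
      rw [jsToks.eq_def] at hp
      simp only [reduceIte] at hp
      split at hp
      · simp at hp
      · next heq => rw [hsk] at heq; simp at heq
  | case3 rest i head tail j hsk ih =>
      intro p hp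
      rw [jsToks.eq_def] at hp
      simp only [reduceIte] at hp
      split at hp
      · next heq => rw [hsk] at heq; simp at heq
      · next heq =>
          rw [hsk] at heq
          simp only [Prod.mk.injEq, List.cons.injEq] at heq
          obtain ⟨⟨rfl, rfl⟩, rfl⟩ := heq
          exact ih p hp
  | case4 c rest i h1 h2 ih =>
      intro p hp
      rw [jsToks.eq_def] at hp
      simp only [if_neg h1, if_pos h2, List.mem_cons] at hp
      rcases hp with rfl | hp
      · exact h2
      · exact ih p hp
  | case5 c rest i h1 h2 ih =>
      intro p hp
      rw [jsToks.eq_def] at hp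
      simp only [if_neg h1, if_neg h2] at hp
      exact ih p hp

theorem jsMatchS_mem : ∀ (n : Nat) (close : Char) (l : List (Nat × Char)), l.length ≤ n →
    ∀ p, p ∈ (jsMatchS close l).val.2 → p ∈ l := by
  intro n
  induction n with
  | zero =>
      intro close l hl p hp
      have hnil : l = [] := List.eq_nil_of_length_eq_zero (Nat.le_zero.mp hl)
      subst hnil; simp [jsMatchS] at hp
  | succ n ih =>
      intro close l hl p hp
      match l with
      | [] => simp [jsMatchS] at hp
      | (q, c) :: rest =>
        simp only [jsMatchS] at hp
        split at hp
        · next hc =>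
            have hr : rest.length ≤ n := by simp at hl; omega
            split at hp
            · next heq =>
                simp only at hp
                have : p ∈ (jsMatchS (jsCloseOf c) rest).val.2 := by
                  rw [heq]; exact hp
                exact List.mem_cons_of_mem _ (ih _ rest hr p this)
            · next q' rest' heq =>
                simp only at hp
                have h1 : rest'.length ≤ rest.length := by
                  have := (jsMatchS (jsCloseOf c) rest).property
                  rw [heq] at this; exact this
                have h2 : p ∈ rest' := ih close rest' (le_trans h1 hr) p hp
                have : p ∈ (jsMatchS (jsCloseOf c) rest).val.2 := by
                  rw [heq]; exact h2
                exact List.mem_cons_of_mem _ (ih _ rest hr p this)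
        · split at hp
          · simp at hp; exact List.mem_cons_of_mem _ hp
          · simp at hp; exact List.mem_cons_of_mem _ hp

-- key lemma: jsM with a nonempty stack is a jsMatch call followed by the continuation
theorem jsM_descent : ∀ (n : Nat) (l : List (Nat × Char)), l.length ≤ n →
    ∀ (o : Char) (s' : List Char) (start : Int) (segs : List (Int × Int)),
    (o = '{' ∨ o = '[') → (s' = [] → 0 ≤ start) → (∀ p ∈ l, jsBr p.2) →
    jsM l (o :: s') start segs =
      (match jsMatch (jsCloseOf o) l with
       | (some q, rest) =>
           if s' = [] then jsM rest [] (-1) (segs ++ [(start, (q : Int) + 1)])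
           else jsM rest s' start segs
       | (none, rest) => jsM rest [] (-1) segs) := by
  intro n
  induction n with
  | zero =>
      intro l hl o s' start segs ho hs hb
      match l with
      | [] => simp [jsM, jsMatch, jsMatchS]
  | succ n ih =>
      intro l hl o s' start segs ho hs hb
      match l with
      | [] => simp [jsM, jsMatch, jsMatchS]
      | (p, c) :: rest =>
        have hr : rest.length ≤ n := by simp at hl; omega
        have hbr : ∀ q ∈ rest, jsBr q.2 := fun q hq => hb q (List.mem_cons_of_mem _ hq)
        by_cases hc : c = '{' ∨ c = '['
        · -- opener: push, recurse
          have hM : jsM ((p, c) :: rest) (o :: s') start segs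
              = jsM rest (c :: o :: s') start segs := by
            simp [jsM, hc]
          rw [hM]
          rw [ih rest hr c (o :: s') start segs hc (by simp) hbr]
          have hJ : jsMatch (jsCloseOf o) ((p, c) :: rest)
              = (match jsMatch (jsCloseOf c) rest with
                 | (none, rest') => (none, rest')
                 | (some _, rest') => jsMatch (jsCloseOf o) rest') := by
            simp only [jsMatch, jsMatchS, if_pos hc]
            split <;> rename_i heq
            · simp [heq]
            · simp [heq]
          rw [hJ]
          match hq : jsMatch (jsCloseOf c) rest with
          | (none, rest') => simp
          | (some q, rest') =>
            simp only
            have hr' : rest'.length ≤ n := by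
              have := jsMatch_len_le (jsCloseOf c) rest
              rw [hq] at this; simp at this; omega
            have hbr' : ∀ q ∈ rest', jsBr q.2 := by
              intro q hq'
              have : q ∈ (jsMatchS (jsCloseOf c) rest).val.2 := by
                have : (jsMatchS (jsCloseOf c) rest).val = (some _, rest') := hq
                rw [this]; exact hq'
              exact hbr q (jsMatchS_mem rest.length _ rest le_rfl q this)
            exact ih rest' hr' o s' start segs ho hs hbr'
        · have hcl : c = '}' ∨ c = ']' := by
            have := hb (p, c) (List.mem_cons_self ..)
            simp only [jsBr] at this; tauto
          by_cases hmatch : c = (jsCloseOf o)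
          · -- matching close
            have hpair : (o = '{' ∧ c = '}') ∨ (o = '[' ∧ c = ']') := by
              rcases ho with rfl | rfl <;> simp [jsCloseOf] at hmatch <;> simp [hmatch]
            have hJ : jsMatch (jsCloseOf o) ((p, c) :: rest) = (some p, rest) := by
              simp only [jsMatch, jsMatchS, if_neg hc, if_pos hmatch]
            rw [hJ]
            simp only
            by_cases hse : s' = []
            · subst hse
              have h0 : 0 ≤ start := hs rfl
              simp [jsM, hc, hcl, hpair, h0]
            · simp [jsM, hc, hcl, hpair, hse]
          · -- mismatching close
            have hpair : ¬((o = '{' ∧ c = '}') ∨ (o = '[' ∧ c = ']')) := by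
              rcases ho with rfl | rfl <;> simp [jsCloseOf] at hmatch <;> simp [hmatch]
            have hJ : jsMatch (jsCloseOf o) ((p, c) :: rest) = (none, rest) := by
              simp only [jsMatch, jsMatchS, if_neg hc, if_neg hmatch]
            rw [hJ]
            simp [jsM, hc, hcl, hpair]

theorem jsM_eq_top : ∀ (n : Nat) (l : List (Nat × Char)), l.length ≤ n →
    (∀ p ∈ l, jsBr p.2) → ∀ (start : Int) (segs : List (Int × Int)),
    jsM l [] start segs = jsTop l segs := by
  intro n
  induction n with
  | zero =>
      intro l hl hb start segs
      match l with
      | [] => simp [jsM, jsTop]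
  | succ n ih =>
      intro l hl hb start segs
      match l with
      | [] => simp [jsM, jsTop]
      | (p, c) :: rest =>
        have hr : rest.length ≤ n := by simp at hl; omega
        have hbr : ∀ q ∈ rest, jsBr q.2 := fun q hq => hb q (List.mem_cons_of_mem _ hq)
        by_cases hc : c = '{' ∨ c = '['
        · have hM : jsM ((p, c) :: rest) [] start segs = jsM rest [c] (p : Int) segs := by
            simp [jsM, hc]
          rw [hM]
          rw [jsM_descent rest.length rest le_rfl c [] (p : Int) segs hc (by intro; positivity) hbr]
          rw [jsTop.eq_def]
          simp only [if_pos hc]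
          match hq : jsMatch (jsCloseOf c) rest with
          | (some q, rest') =>
            simp only [reduceIte]
            have hr' : rest'.length ≤ n := by
              have := jsMatch_len_le (jsCloseOf c) rest
              rw [hq] at this; simp at this; omega
            have hbr' : ∀ q ∈ rest', jsBr q.2 := by
              intro q hq'
              have : q ∈ (jsMatchS (jsCloseOf c) rest).val.2 := by
                have h2 : (jsMatchS (jsCloseOf c) rest).val = (some _, rest') := hq
                rw [h2]; exact hq'
              exact hbr q (jsMatchS_mem rest.length _ rest le_rfl q this)
            exact ih rest' hr' hbr' (-1) _
          | (none, rest') =>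
            simp only
            have hr' : rest'.length ≤ n := by
              have := jsMatch_len_le (jsCloseOf c) rest
              rw [hq] at this; simp at this; omega
            have hbr' : ∀ q ∈ rest', jsBr q.2 := by
              intro q hq'
              have : q ∈ (jsMatchS (jsCloseOf c) rest).val.2 := by
                have h2 : (jsMatchS (jsCloseOf c) rest).val = (none, rest') := hq
                rw [h2]; exact hq'
              exact hbr q (jsMatchS_mem rest.length _ rest le_rfl q this)
            exact ih rest' hr' hbr' (-1) _
        · have hcl : c = '}' ∨ c = ']' := by
            have := hb (p, c) (List.mem_cons_self ..)
            simp only [jsBr] at this; tauto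
          have hM : jsM ((p, c) :: rest) [] start segs = jsM rest [] start segs := by
            simp [jsM, hc, hcl]
          have hT : jsTop ((p, c) :: rest) segs = jsTop rest segs := by
            rw [jsTop.eq_def]; simp [hc]
          rw [hM, hT]
          exact ih rest hr hbr start segs

-- ===== VERDICT (by name: the statement is the Claim_ definition above) =====
theorem json_segments_py_spec : Claim_equal_json_segments_py := by
  intro text _
  unfold Spec_json_segments_py json_segments_py json_segments_py_alt
  have h0 : ((0 : Int)) = ((0 : Nat) : Int) := by simp
  rw [h0, jsA_eq_M text.toList 0 [] (-1) []]
  exact jsM_eq_top (jsToks text.toList 0).length _ le_rfl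
    (jsToks_brackets text.toList 0) (-1) []
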